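-- pv_equiv track=rewrite | github.com/alexandraback/datacollection | solutions_5670465267826688_1/Python/krull/C_rev2.py | UnitProduct
-- ===== SOURCE A (Python) =====
-- Q = { '1': {'1': '1', 'i': 'i', 'j': 'j', 'k': 'k'},
--       'i': {'1': 'i', 'i':'-1', 'j': 'k', 'k': '-j'},
--       'j': { '1': 'j', 'i': '-k', 'j':'-1', 'k': 'i'},
--       'k': {'1': 'k', 'i': 'j', 'j': '-i', 'k': '-1'}}
--
-- def Product(x, y):
--     #print "len-x, len-y : ", len(x), len(y)
--     xp = x[0]
--     yp = y[0]
--     xsign = 1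
--     ysign = 1
--     if len(x) == 2:
--         xsign = -1
--         xp = x[1]
--     if len(y) == 2:
--         ysign = -1
--         yp = y[1]
--     #print "x-sign, y-sign: ", xsign, ysign
--     prod_sign = xsign * ysign
--     #print xp, yp, Q[xp][yp]
--     if len(Q[xp][yp]) == 2:
--         result_sign = -1
--         prod = Q[xp][yp][1]
--     else:
--         result_sign = 1
--         prod = Q[xp][yp][0]
--     #print "prod_sign, result_sign = ", prod_sign, result_sign
--     result_sign = result_sign * prod_sign
--     if result_sign < 0:
--         prod = '-' + prod
--     return prod
--
-- def UnitProduct(cstr):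
--     prod = '1'
--     p = 0
--     N = len(cstr)
--     while p < N:
--         prod = Product(prod, cstr[p])
--         p += 1
--     return prod
-- ===== SOURCE B (Python) =====
-- # B: quaternion units in exponent normal form (-1)^s * i^a * j^b (k = i*j);
-- # the product is computed by divide-and-conquer over halves of the sequence,
-- # with multiplication done by mod-2 exponent arithmetic (j*i = -i*j, i^2 = j^2 = -1),
-- # so no multiplication table is needed.
--
-- _EXP = {'1': (0, 0), 'i': (1, 0), 'j': (0, 1), 'k': (1, 1)}
-- _UNITS = '1ijk'
--
-- def _enc(s):
--     neg = len(s) == 2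
--     c = s[1] if neg else s[0]
--     a, b = _EXP[c]
--     return (1 if neg else 0, a, b)
--
-- def _mul(x, y):
--     s1, a1, b1 = x
--     s2, a2, b2 = y
--     # move i^a2 left past j^b1: sign (-1)^(b1*a2); reduce i^2 = -1, j^2 = -1
--     return ((s1 + s2 + b1 * a2 + a1 * a2 + b1 * b2) % 2, (a1 + a2) % 2, (b1 + b2) % 2)
--
-- def _prod(cs, lo, hi):
--     if hi - lo == 0:
--         return (0, 0, 0)
--     if hi - lo == 1:
--         return _enc(cs[lo])
--     mid = (lo + hi) // 2
--     return _mul(_prod(cs, lo, mid), _prod(cs, mid, hi))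
--
-- def UnitProduct(cstr):
--     s, a, b = _prod(cstr, 0, len(cstr))
--     u = _UNITS[2 * b + a]
--     return ('-' + u) if s else u
-- ===== Notes on version B (the rewrite author's own statement) =====
-- stated objective: alternative
-- what changed: B represents each unit in exponent normal form (-1)^s i^a j^b (k = i*j) and multiplies by mod-2 exponent arithmetic (j*i = -i*j, i^2 = j^2 = -1) with no multiplication table, computing the product by divide-and-conquer over halves of the list instead of A's left-to-right signed-string pass through a nested string dict.
import Mathlib
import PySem

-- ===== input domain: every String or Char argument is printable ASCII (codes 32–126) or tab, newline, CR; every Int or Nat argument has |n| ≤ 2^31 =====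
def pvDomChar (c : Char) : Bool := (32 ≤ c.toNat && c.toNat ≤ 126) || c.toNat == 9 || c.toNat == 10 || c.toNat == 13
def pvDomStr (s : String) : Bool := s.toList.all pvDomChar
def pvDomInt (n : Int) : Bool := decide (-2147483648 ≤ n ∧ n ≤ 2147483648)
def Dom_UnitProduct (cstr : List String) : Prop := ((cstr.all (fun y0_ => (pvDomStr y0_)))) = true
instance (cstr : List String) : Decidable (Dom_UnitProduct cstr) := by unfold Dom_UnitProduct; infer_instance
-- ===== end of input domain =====

-- B computes the same product with units in exponent normal form (-1)^s i^a j^b and mod-2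
-- exponent arithmetic instead of a multiplication table, by divide-and-conquer over halves
-- of the list instead of A's left-to-right signed-string pass (objective: alternative).

-- ===== PORT A =====
-- Python's 1-char string keys of Q are represented as Char (exact: the keys are 1-char strings).
def Qd : PySem.Dict Char (PySem.Dict Char String) :=
  PySem.Dict.ofList
    [('1', PySem.Dict.ofList [('1', "1"), ('i', "i"), ('j', "j"), ('k', "k")]),
     ('i', PySem.Dict.ofList [('1', "i"), ('i', "-1"), ('j', "k"), ('k', "-j")]),
     ('j', PySem.Dict.ofList [('1', "j"), ('i', "-k"), ('j', "-1"), ('k', "i")]),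
     ('k', PySem.Dict.ofList [('1', "k"), ('i', "j"), ('j', "-i"), ('k', "-1")])]

-- the .getD defaults (' ', " ", empty dict) stand exactly where Python raises
-- IndexError/KeyError; Pre_UnitProduct excludes those inputs, so they are never reached.
def Product (x y : String) : String :=
  let xp := (PySem.Str.pyGet? x 0).getD ' '
  let yp := (PySem.Str.pyGet? y 0).getD ' '
  let xsign : Int := 1
  let ysign : Int := 1
  let (xsign, xp) := if PySem.Str.len x = 2 then ((-1 : Int), (PySem.Str.pyGet? x 1).getD ' ') else (xsign, xp)
  let (ysign, yp) := if PySem.Str.len y = 2 then ((-1 : Int), (PySem.Str.pyGet? y 1).getD ' ') else (ysign, yp)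
  let prod_sign := xsign * ysign
  let q := (((Qd.get? xp).getD PySem.Dict.empty).get? yp).getD " "
  let (result_sign, prod) :=
    if PySem.Str.len q = 2 then ((-1 : Int), (PySem.Str.pyGet? q 1).getD ' ')
    else ((1 : Int), (PySem.Str.pyGet? q 0).getD ' ')
  let result_sign := result_sign * prod_sign
  if result_sign < 0 then String.ofList ['-', prod] else String.ofList [prod]

-- the while-loop 'p = 0; while p < N: prod = Product(prod, cstr[p]); p += 1' as a fold over range(N)
def UnitProduct (cstr : List String) : String :=
  (PySem.List.pyRange 0 (PySem.List.len cstr)).foldl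
    (fun prod p => Product prod (PySem.List.pyGetD cstr p "")) "1"

-- ===== PORT B =====
-- the exponent dict _EXP; lookup .getD (0,0) stands where Python raises KeyError (excluded by Pre_)
def expD : PySem.Dict Char (Nat × Nat) :=
  PySem.Dict.ofList [('1', (0, 0)), ('i', (1, 0)), ('j', (0, 1)), ('k', (1, 1))]

def encB (s : String) : Nat × Nat × Nat :=
  let neg := PySem.Str.len s = 2
  let c := if neg then (PySem.Str.pyGet? s 1).getD ' ' else (PySem.Str.pyGet? s 0).getD ' '
  let ab := (expD.get? c).getD (0, 0)
  ((if neg then 1 else 0), ab.1, ab.2)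

def mulB (x y : Nat × Nat × Nat) : Nat × Nat × Nat :=
  ((x.1 + y.1 + x.2.2 * y.2.1 + x.2.1 * y.2.1 + x.2.2 * y.2.2) % 2,
   (x.2.1 + y.2.1) % 2, (x.2.2 + y.2.2) % 2)

-- _prod: divide-and-conquer over the index range [lo, hi); cs.getD stands for cs[lo] (in range on every call)
def prodRec (cs : List String) (lo hi : Nat) : Nat × Nat × Nat :=
  if hi - lo = 0 then (0, 0, 0)
  else if hi - lo = 1 then encB (cs.getD lo "")
  else
    let mid := (lo + hi) / 2
    mulB (prodRec cs lo mid) (prodRec cs mid hi)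
termination_by hi - lo
decreasing_by all_goals omega

def UnitProduct_alt (cstr : List String) : String :=
  let t := prodRec cstr 0 cstr.length
  let u := (PySem.Str.pyGet? "1ijk" ((2 * t.2.2 + t.2.1 : Nat) : Int)).getD '1'
  if t.1 ≠ 0 then String.ofList ['-', u] else String.ofList [u]

-- ===== PRECONDITION & SPEC =====
def unitsL : List Char := ['1', 'i', 'j', 'k']

-- the effective character a step multiplies by: s[1] when len(s) == 2, else s[0]
def effChar? (s : String) : Option Char :=
  match s.toList with
  | [] => none
  | [_, b] => some b
  | c :: _ => some c

def elemOk (s : String) : Bool :=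
  match effChar? s with
  | none => false
  | some c => decide (c ∈ unitsL)

-- Pre_ excludes exactly the inputs on which A raises: an empty string element (IndexError)
-- or an element whose effective character is not one of '1','i','j','k' (KeyError).
def Pre_UnitProduct (cstr : List String) : Prop := ∀ s ∈ cstr, elemOk s = true
instance (cstr : List String) : Decidable (Pre_UnitProduct cstr) := by unfold Pre_UnitProduct; infer_instance

def pvWitness_UnitProduct : List String := ["i", "-j", "k", "1"]

def Spec_UnitProduct (cstr : List String) (out : String) : Prop := out = UnitProduct_alt cstr
instance (cstr : List String) (out : String) : Decidable (Spec_UnitProduct cstr out) := by unfold Spec_UnitProduct; infer_instance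

-- ===== CLAIM (what is proved, stated in full; the proofs are below) =====
def Claim_equal_UnitProduct : Prop := ∀ (cstr : List String), Dom_UnitProduct cstr → Pre_UnitProduct cstr → Spec_UnitProduct cstr (UnitProduct cstr)

-- ===== LEMMAS AND PROOFS =====

-- the final rendering of a (sign, i-exp, j-exp) state, = the last two lines of UnitProduct_alt
def repB (t : Nat × Nat × Nat) : String :=
  let u := (PySem.Str.pyGet? "1ijk" ((2 * t.2.2 + t.2.1 : Nat) : Int)).getD '1'
  if t.1 ≠ 0 then String.ofList ['-', u] else String.ofList [u]

def stepB (st : Nat × Nat × Nat) (s : String) : Nat × Nat × Nat := mulB st (encB s)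

def red (t : Nat × Nat × Nat) : Prop := t.1 ≤ 1 ∧ t.2.1 ≤ 1 ∧ t.2.2 ≤ 1

lemma mulB_red (x y : Nat × Nat × Nat) : red (mulB x y) := by
  refine ⟨?_, ?_, ?_⟩ <;> simp [mulB] <;> omega

lemma expD_items : expD.items = [('1', (0, 0)), ('i', (1, 0)), ('j', (0, 1)), ('k', (1, 1))] := by
  decide

lemma expD_le (c : Char) : ((expD.get? c).getD (0, 0)).1 ≤ 1 ∧ ((expD.get? c).getD (0, 0)).2 ≤ 1 := by
  simp only [PySem.Dict.get?, expD_items, List.find?]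
  cases '1' == c <;> cases 'i' == c <;> cases 'j' == c <;> cases 'k' == c <;> simp

lemma encB_red (s : String) : red (encB s) := by
  unfold encB red
  refine ⟨?_, (expD_le _).1, (expD_le _).2⟩
  dsimp only
  split <;> simp

lemma mulB_assoc_red (x y z : Nat × Nat × Nat) (hx : red x) (hy : red y) (hz : red z) :
    mulB (mulB x y) z = mulB x (mulB y z) := by
  obtain ⟨x1, x2, x3⟩ := x; obtain ⟨y1, y2, y3⟩ := y; obtain ⟨z1, z2, z3⟩ := z
  obtain ⟨hx1, hx2, hx3⟩ := hx; obtain ⟨hy1, hy2, hy3⟩ := hy; obtain ⟨hz1, hz2, hz3⟩ := hz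
  simp only at hx1 hx2 hx3 hy1 hy2 hy3 hz1 hz2 hz3
  interval_cases x1 <;> interval_cases x2 <;> interval_cases x3 <;>
    interval_cases y1 <;> interval_cases y2 <;> interval_cases y3 <;>
    interval_cases z1 <;> interval_cases z2 <;> interval_cases z3 <;> rfl

lemma mulB_id_left (x : Nat × Nat × Nat) (hx : red x) : mulB (0, 0, 0) x = x := by
  obtain ⟨x1, x2, x3⟩ := x; obtain ⟨h1, h2, h3⟩ := hx
  dsimp only at h1 h2 h3
  simp [mulB, Prod.ext_iff]; omega

lemma mulB_id_right (x : Nat × Nat × Nat) (hx : red x) : mulB x (0, 0, 0) = x := by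
  obtain ⟨x1, x2, x3⟩ := x; obtain ⟨h1, h2, h3⟩ := hx
  dsimp only at h1 h2 h3
  simp [mulB, Prod.ext_iff]; omega

lemma foldl_stepB_red (l : List String) (z : Nat × Nat × Nat) (hz : red z) :
    red (l.foldl stepB z) := by
  induction l generalizing z with
  | nil => exact hz
  | cons s t ih => exact ih _ (mulB_red _ _)

lemma foldl_stepB_mul (l : List String) (x : Nat × Nat × Nat) (hx : red x) :
    l.foldl stepB x = mulB x (l.foldl stepB (0, 0, 0)) := by
  induction l generalizing x with
  | nil => exact (mulB_id_right x hx).symm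
  | cons s t ih =>
    have h1 : red (encB s) := encB_red s
    calc (s :: t).foldl stepB x = t.foldl stepB (mulB x (encB s)) := rfl
      _ = mulB (mulB x (encB s)) (t.foldl stepB (0, 0, 0)) := ih _ (mulB_red _ _)
      _ = mulB x (mulB (encB s) (t.foldl stepB (0, 0, 0))) :=
          mulB_assoc_red _ _ _ hx h1 (foldl_stepB_red t _ (by unfold red; simp))
      _ = mulB x (t.foldl stepB (mulB (0, 0, 0) (encB s))) := by
          rw [← ih (encB s) h1, mulB_id_left _ h1]
      _ = mulB x ((s :: t).foldl stepB (0, 0, 0)) := rfl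

lemma prodRec_eq (cs : List String) : ∀ (n lo hi : Nat), hi - lo = n → hi ≤ cs.length →
    prodRec cs lo hi = ((cs.drop lo).take (hi - lo)).foldl stepB (0, 0, 0) := by
  intro n
  induction n using Nat.strong_induction_on with
  | _ n ih =>
    intro lo hi hn hlen
    rw [prodRec]
    by_cases h0 : hi - lo = 0
    · simp [h0]
    by_cases h1 : hi - lo = 1
    · have hlo : lo < cs.length := by omega
      have hdrop : cs.drop lo = cs[lo] :: cs.drop (lo + 1) := List.drop_eq_getElem_cons hlo
      rw [if_neg h0, if_pos h1, h1, hdrop]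
      simp only [List.take_succ_cons, List.take_zero, List.foldl_cons, List.foldl_nil, stepB]
      rw [mulB_id_left _ (encB_red _), List.getD_eq_getElem _ _ hlo]
    · simp only [h0, h1, if_false]
      have hsplit : (cs.drop lo).take (hi - lo)
          = (cs.drop lo).take ((lo + hi) / 2 - lo) ++ (cs.drop ((lo + hi) / 2)).take (hi - (lo + hi) / 2) := by
        have h2 : hi - lo = ((lo + hi) / 2 - lo) + (hi - (lo + hi) / 2) := by omega
        rw [h2, List.take_add, List.drop_drop]
        have h3 : lo + ((lo + hi) / 2 - lo) = (lo + hi) / 2 := by omega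
        rw [h3]
      rw [hsplit, List.foldl_append,
        ih ((lo + hi) / 2 - lo) (by omega) lo ((lo + hi) / 2) rfl (by omega),
        ih (hi - (lo + hi) / 2) (by omega) ((lo + hi) / 2) hi rfl (by omega),
        foldl_stepB_mul _ _ (foldl_stepB_red _ _ (by unfold red; simp))]

-- A step and a B step depend on the element only through (len == 2, effective char):
-- replace an arbitrary element by its canonical 1- or 2-char form.
lemma Product_y2 (x s : String) (a b : Char) (hs : s.toList = [a, b]) :
    Product x s = Product x (String.ofList ['-', b]) := by
  simp only [Product, PySem.Str.len, PySem.Str.pyGet?, hs, String.toList_ofList]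
  norm_num [PySem.Chars.pyGet?]

lemma Product_y1 (x s : String) (a : Char) (rest : List Char) (hs : s.toList = a :: rest)
    (h2 : rest.length ≠ 1) :
    Product x s = Product x (String.ofList [a]) := by
  have h2' : ¬ ((rest.length : Int) + 1 = 2) := by omega
  simp only [Product, PySem.Str.len, PySem.Str.pyGet?, hs, String.toList_ofList]
  norm_num [PySem.Chars.pyGet?, h2']

lemma encB_y2 (s : String) (a b : Char) (hs : s.toList = [a, b]) :
    encB s = encB (String.ofList ['-', b]) := by
  simp only [encB, PySem.Str.len, PySem.Str.pyGet?, hs, String.toList_ofList]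
  norm_num [PySem.Chars.pyGet?]

lemma encB_y1 (s : String) (a : Char) (rest : List Char) (hs : s.toList = a :: rest)
    (h2 : rest.length ≠ 1) :
    encB s = encB (String.ofList [a]) := by
  have h2' : ¬ ((rest.length : Int) + 1 = 2) := by omega
  simp only [encB, PySem.Str.len, PySem.Str.pyGet?, hs, String.toList_ofList]
  norm_num [PySem.Chars.pyGet?, h2']

set_option maxHeartbeats 2000000 in
lemma step_ok (st : Nat × Nat × Nat) (hst : red st) (s : String) (hs : elemOk s = true) :
    Product (repB st) s = repB (stepB st s) ∧ red (stepB st s) := by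
  obtain ⟨s1, s2, s3⟩ := st
  obtain ⟨h1, h2, h3⟩ := hst
  cases hcs : s.toList with
  | nil => simp [elemOk, effChar?, hcs] at hs
  | cons a rest =>
  by_cases hl : rest.length = 1
  · obtain ⟨b, hb⟩ : ∃ b, rest = [b] := by
      cases rest with
      | nil => simp at hl
      | cons b t => cases t with
        | nil => exact ⟨b, rfl⟩
        | cons _ _ => simp at hl
    subst hb
    have hc : b ∈ unitsL := by simpa [elemOk, effChar?, hcs] using hs
    rw [Product_y2 _ s a b hcs, stepB, encB_y2 s a b hcs]
    interval_cases s1 <;> interval_cases s2 <;> interval_cases s3 <;> fin_cases hc <;>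
      exact ⟨by decide, by unfold red; decide⟩
  · have hc : a ∈ unitsL := by
      cases rest with
      | nil => simpa [elemOk, effChar?, hcs] using hs
      | cons r t =>
        cases t with
        | nil => simp at hl
        | cons r2 t2 => simpa [elemOk, effChar?, hcs] using hs
    rw [Product_y1 _ s a rest hcs hl, stepB, encB_y1 s a rest hcs hl]
    interval_cases s1 <;> interval_cases s2 <;> interval_cases s3 <;> fin_cases hc <;>
      exact ⟨by decide, by unfold red; decide⟩

lemma fold_ok (cstr : List String) (st : Nat × Nat × Nat) (hst : red st)
    (hpre : ∀ s ∈ cstr, elemOk s = true) :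
    cstr.foldl Product (repB st) = repB (cstr.foldl stepB st) := by
  induction cstr generalizing st with
  | nil => rfl
  | cons x xs ih =>
    obtain ⟨heq, hred⟩ := step_ok st hst x (hpre x (by simp))
    simp only [List.foldl_cons, heq]
    exact ih (stepB st x) hred (fun s hs => hpre s (List.mem_cons_of_mem _ hs))

-- ===== VERDICT (by name: the statement is the Claim_ definition above) =====
theorem UnitProduct_spec : Claim_equal_UnitProduct := by
  intro cstr _hdom hpre
  unfold Spec_UnitProduct UnitProduct UnitProduct_alt
  rw [PySem.List.foldl_pyRange_zero_pyGetD cstr "" Product "1"]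
  have h1 : repB (0, 0, 0) = "1" := by decide
  rw [← h1, fold_ok cstr (0, 0, 0) (by unfold red; simp) hpre,
    prodRec_eq cstr (cstr.length - 0) 0 cstr.length rfl (le_refl _)]
  simp [repB]
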